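-- pv_equiv track=rewrite | github.com/Arsene2005/Morpion | morpion.py | choose_winning_move
-- ===== SOURCE A (Python) =====
-- def is_winner(grid, symbol):
--     """
--     Checks if the player with the specified symbol has won.
--     """
--     size = len(grid)
--     for i in range(size):
--         if all(grid[i][j] == symbol for j in range(size)) or \
--            all(grid[j][i] == symbol for j in range(size)) or \
--            all(grid[i][i] == symbol for i in range(size)) or \
--            all(grid[i][size - i - 1] == symbol for i in range(size)):
--             return True
--     return False
--
-- def choose_winning_move(grid, symbol):
--     """
--     Chooses a winning move if available.
--     """
--     size = len(grid)
--     for i in range(size):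
--         for j in range(size):
--             if grid[i][j] == "-":
--                 grid[i][j] = symbol
--                 if is_winner(grid, symbol):
--                     grid[i][j] = "-"
--                     return i, j
--                 grid[i][j] = "-"
--     return None
-- ===== SOURCE B (Python) =====
-- def choose_winning_move(grid, symbol):
--     """
--     Chooses a winning move if available: an empty cell lying on a line
--     (row, column or diagonal) that already holds size-1 of the symbol.
--     """
--     size = len(grid)
--     rowcnt = [sum(grid[i][j] == symbol for j in range(size)) for i in range(size)]
--     colcnt = [sum(grid[i][j] == symbol for i in range(size)) for j in range(size)]
--     dcnt = sum(grid[i][i] == symbol for i in range(size))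
--     acnt = sum(grid[i][size - 1 - i] == symbol for i in range(size))
--     for i in range(size):
--         for j in range(size):
--             if grid[i][j] == "-":
--                 if rowcnt[i] == size - 1 or colcnt[j] == size - 1 \
--                    or (i == j and dcnt == size - 1) \
--                    or (i + j == size - 1 and acnt == size - 1):
--                     return i, j
--     return None
-- ===== Notes on version B (the rewrite author's own statement) =====
-- stated objective: alternative
-- what changed: B precomputes per-row/per-column/diagonal symbol counts in one pass and returns the first empty cell on a line holding size-1 symbols, instead of A's placing the symbol in every empty cell and re-running the full-board is_winner scan; Pre_ excludes ragged grids (B's counting pass raises IndexError there) and, when the board still has an empty cell, symbol == '-' and already-won grids (there A's answer is an accident of its place-then-check mechanics: it returns the first empty cell regardless of any line being completable).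
-- outside the precondition, e.g. on choose_winning_move([['-', 'x'], ['x']], 'x'): A returns (0, 0), B raises IndexError; on choose_winning_move([['-']], '-'): A returns (0, 0), B returns None; on choose_winning_move([['x', 'x', 'x'], ['-', 'o', 'o'], ['o', 'o', 'o']], 'x'): A returns (1, 0), B returns None
import Mathlib
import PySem

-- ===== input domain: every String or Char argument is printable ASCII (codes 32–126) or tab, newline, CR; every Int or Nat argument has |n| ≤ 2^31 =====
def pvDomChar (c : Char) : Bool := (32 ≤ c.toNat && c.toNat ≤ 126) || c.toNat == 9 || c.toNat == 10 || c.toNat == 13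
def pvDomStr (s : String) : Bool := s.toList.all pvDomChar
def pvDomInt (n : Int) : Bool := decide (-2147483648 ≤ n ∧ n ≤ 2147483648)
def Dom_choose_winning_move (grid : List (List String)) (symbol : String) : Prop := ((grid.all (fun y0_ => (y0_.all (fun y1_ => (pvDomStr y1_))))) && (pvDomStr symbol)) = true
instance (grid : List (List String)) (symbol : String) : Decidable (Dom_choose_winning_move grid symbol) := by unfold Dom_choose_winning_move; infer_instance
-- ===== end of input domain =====

-- B replaces A's place-the-symbol-and-rescan-the-whole-board test per empty cell by one pass
-- of per-row/per-column/diagonal symbol counts; equal on Pre_ (rectangular grids, a real symbol,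
-- game not already won).  A mutates grid cells but always restores them, so it has no net side
-- effect; the equivalence is about the return value.

-- ===== PORT A =====
-- grid[i][j]; inside Pre_ every access is in range, so getD's default is never used.
def pvCell (grid : List (List String)) (i j : Nat) : String := (grid.getD i []).getD j ""

-- grid[i][j] = v  (row i and column j in range inside every use below)
def pvSetCell (grid : List (List String)) (i j : Nat) (v : String) : List (List String) :=
  grid.set i ((grid.getD i []).set j v)

-- literal port of is_winner (the two diagonal generators re-bind i, so they are closed checks)
def pvIsWinner (grid : List (List String)) (symbol : String) : Bool :=
  let size := grid.length
  (List.range size).any (fun i =>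
    ((List.range size).all fun j => pvCell grid i j == symbol) ||
    ((List.range size).all fun j => pvCell grid j i == symbol) ||
    ((List.range size).all fun k => pvCell grid k k == symbol) ||
    ((List.range size).all fun k => pvCell grid k (size - k - 1) == symbol))

def choose_winning_move (grid : List (List String)) (symbol : String) : Option (Int × Int) :=
  let size := grid.length
  (List.range size).findSome? fun i =>
    (List.range size).findSome? fun j =>
      if pvCell grid i j == "-" then
        -- grid[i][j] = symbol; test; grid[i][j] = "-" (restored in both branches)
        if pvIsWinner (pvSetCell grid i j symbol) symbol then some ((i : Int), (j : Int))
        else none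
      else none

-- ===== PORT B =====
def choose_winning_move_alt (grid : List (List String)) (symbol : String) : Option (Int × Int) :=
  let size := grid.length
  let rowcnt := (List.range size).map (fun i => (List.range size).countP (fun j => pvCell grid i j == symbol))
  let colcnt := (List.range size).map (fun j => (List.range size).countP (fun i => pvCell grid i j == symbol))
  let dcnt := (List.range size).countP (fun i => pvCell grid i i == symbol)
  let acnt := (List.range size).countP (fun i => pvCell grid i (size - 1 - i) == symbol)
  (List.range size).findSome? fun i =>
    (List.range size).findSome? fun j =>
      if pvCell grid i j == "-" then
        if rowcnt.getD i 0 == size - 1 || colcnt.getD j 0 == size - 1 ||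
           (i == j && dcnt == size - 1) ||
           (i + j == size - 1 && acnt == size - 1)
        then some ((i : Int), (j : Int)) else none
      else none

-- ===== PRECONDITION & SPEC =====
-- Pre_ excludes: ragged grids (a row shorter than len(grid)), on which B's upfront counting
-- pass raises IndexError; and, when the board still has an empty cell, symbol == "-" (placing
-- the blank marker is degenerate, A's answer there is an accident of its place-then-check
-- mechanics) and grids where symbol has already completed a line (the game is over, A's
-- first-empty-cell answer there is an artefact of the same mechanics).
def Pre_choose_winning_move (grid : List (List String)) (symbol : String) : Prop :=
  (∀ row ∈ grid, grid.length ≤ row.length) ∧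
  ((∃ i < grid.length, ∃ j < grid.length, pvCell grid i j = "-") →
    symbol ≠ "-" ∧
    ¬ ((∃ r < grid.length, ∀ c < grid.length, pvCell grid r c = symbol) ∨
       (∃ c < grid.length, ∀ r < grid.length, pvCell grid r c = symbol) ∨
       (0 < grid.length ∧ ∀ k < grid.length, pvCell grid k k = symbol) ∨
       (0 < grid.length ∧ ∀ k < grid.length, pvCell grid k (grid.length - k - 1) = symbol)))
instance (grid : List (List String)) (symbol : String) : Decidable (Pre_choose_winning_move grid symbol) := by unfold Pre_choose_winning_move; infer_instance

def pvWitness_choose_winning_move : List (List String) × String :=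
  ([["-", "x"], ["o", "-"]], "x")

def Spec_choose_winning_move (grid : List (List String)) (symbol : String) (out : Option (Int × Int)) : Prop := out = choose_winning_move_alt grid symbol
instance (grid : List (List String)) (symbol : String) (out : Option (Int × Int)) : Decidable (Spec_choose_winning_move grid symbol out) := by unfold Spec_choose_winning_move; infer_instance

-- ===== CLAIM (what is proved, stated in full; the proofs are below) =====
def Claim_equal_choose_winning_move : Prop := ∀ (grid : List (List String)) (symbol : String), Dom_choose_winning_move grid symbol → Pre_choose_winning_move grid symbol → Spec_choose_winning_move grid symbol (choose_winning_move grid symbol)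

-- ===== LEMMAS AND PROOFS =====

theorem pv_findSome?_congr {α β : Type} (l : List α) (f g : α → Option β)
    (h : ∀ x ∈ l, f x = g x) : l.findSome? f = l.findSome? g := by
  induction l with
  | nil => rfl
  | cons a t ih =>
    simp only [List.findSome?_cons, h a (List.mem_cons_self ..)]
    cases g a with
    | none => exact ih (fun x hx => h x (List.mem_cons_of_mem _ hx))
    | some b => rfl

theorem pv_all_congr (l : List Nat) (f g : Nat → Bool)
    (h : ∀ x ∈ l, f x = g x) : l.all f = l.all g := by
  induction l with
  | nil => rfl
  | cons a t ih =>
    simp only [List.all_cons, h a (List.mem_cons_self ..),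
      ih (fun x hx => h x (List.mem_cons_of_mem _ hx))]

theorem pv_all_iff_count (p : Nat → Bool) (n : Nat) :
    (List.range n).all p = true ↔ (List.range n).countP p = n := by
  rw [List.all_eq_true]
  constructor
  · intro h
    have := List.countP_eq_length.mpr h
    simpa using this
  · intro h
    exact List.countP_eq_length.mp (h.trans (List.length_range ..).symm)

theorem pv_count_almost (p : Nat → Bool) (n j : Nat) (hj : j < n) (hpj : p j = false) :
    (∀ c, c < n → c ≠ j → p c = true) ↔ (List.range n).countP p + 1 = n := by
  have hsplit : ((List.range n).filter p).length +
      ((List.range n).filter (fun a => !p a)).length = n := by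
    have := List.length_eq_length_filter_add (l := List.range n) p
    simp only [List.length_range] at this
    omega
  have hcp : (List.range n).countP p = ((List.range n).filter p).length :=
    List.countP_eq_length_filter
  constructor
  · intro h
    have hmem : j ∈ (List.range n).filter (fun a => !p a) := by
      simp [List.mem_filter, List.mem_range, hj, hpj]
    have hall : ∀ x ∈ (List.range n).filter (fun a => !p a), x = j := by
      intro x hx
      simp only [List.mem_filter, List.mem_range, Bool.not_eq_eq_eq_not, Bool.not_true] at hx
      by_contra hne
      have := h x hx.1 hne
      rw [this] at hx
      exact absurd hx.2 (by simp)
    have hnd := List.Nodup.filter (fun a => !p a) (List.nodup_range (n := n))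
    have hrep := List.eq_replicate_of_mem hall
    have hle : ((List.range n).filter (fun a => !p a)).length ≤ 1 := by
      rw [hrep] at hnd
      exact List.nodup_replicate.mp hnd
    have hge : 0 < ((List.range n).filter (fun a => !p a)).length :=
      List.length_pos_of_mem hmem
    omega
  · intro h c hc hne
    by_contra hpc
    have h1 : ((List.range n).filter (fun a => !p a)).length = 1 := by omega
    obtain ⟨a, ha⟩ := List.length_eq_one_iff.mp h1
    have hjmem : j ∈ (List.range n).filter (fun a => !p a) := by
      simp [List.mem_filter, List.mem_range, hj, hpj]
    have hcmem : c ∈ (List.range n).filter (fun a => !p a) := by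
      simp only [Bool.not_eq_true] at hpc
      simp [List.mem_filter, List.mem_range, hc, hpc]
    rw [ha] at hjmem hcmem
    simp only [List.mem_singleton] at hjmem hcmem
    exact hne (hcmem.trans hjmem.symm)

theorem pv_line_iff (p : Nat → Bool) (n j : Nat) (hj : j < n) :
    ((List.range n).all (fun c => c == j || p c) = true) ↔
      ((List.range n).countP p : Int) - (if p j then 1 else 0) = (n : Int) - 1 := by
  have hmem : ((List.range n).all (fun c => c == j || p c) = true) ↔
      (∀ c, c < n → c ≠ j → p c = true) := by
    rw [List.all_eq_true]
    simp only [List.mem_range, Bool.or_eq_true, beq_iff_eq]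
    constructor
    · intro h c hc hne
      rcases h c hc with h' | h'
      · exact absurd h' hne
      · exact h'
    · intro h c hc
      by_cases hcj : c = j
      · exact Or.inl hcj
      · exact Or.inr (h c hc hcj)
  have hcle : (List.range n).countP p ≤ n := by
    have := List.countP_le_length (p := p) (l := List.range n)
    simpa using this
  by_cases hpj : p j = true
  · rw [if_pos hpj]
    have hptw : ∀ c ∈ List.range n, (c == j || p c) = p c := by
      intro c _
      by_cases hcj : c = j
      · subst hcj; simp [hpj]
      · simp [hcj]
    rw [pv_all_congr _ _ _ hptw, pv_all_iff_count]
    omega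
  · have hpj2 : p j = false := by
      cases h2 : p j
      · rfl
      · exact absurd h2 hpj
    rw [if_neg hpj, hmem, pv_count_almost p n j hj hpj2]
    omega

theorem pv_getD_map_range (f : Nat → Nat) (n i : Nat) (h : i < n) :
    ((List.range n).map f).getD i 0 = f i := by
  rw [List.getD_eq_getElem?_getD, List.getElem?_map, List.getElem?_range h]
  rfl

theorem pv_getD_set_eq {α : Type} (l : List α) (i : Nat) (a d : α) (h : i < l.length) :
    (l.set i a).getD i d = a := by
  rw [List.getD_eq_getElem?_getD (l := l.set i a), List.getElem?_set_self h]
  rfl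

theorem pv_getD_set_ne {α : Type} (l : List α) (i j : Nat) (a d : α) (h : i ≠ j) :
    (l.set i a).getD j d = l.getD j d := by
  rw [List.getD_eq_getElem?_getD (l := l.set i a), List.getElem?_set_ne h,
    ← List.getD_eq_getElem?_getD]

theorem pv_cell_set (grid : List (List String)) (v : String) (i j r c : Nat)
    (pre : ∀ row ∈ grid, grid.length ≤ row.length)
    (hi : i < grid.length) (hj : j < grid.length) :
    pvCell (pvSetCell grid i j v) r c =
      if r = i ∧ c = j then v else pvCell grid r c := by
  unfold pvCell pvSetCell
  by_cases hr : r = i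
  · subst hr
    rw [pv_getD_set_eq _ _ _ _ hi]
    have hjlen : j < (grid.getD r []).length := by
      have hmem : grid.getD r [] ∈ grid := by
        rw [List.getD_eq_getElem?_getD (l := grid), List.getElem?_eq_getElem hi]
        exact List.getElem_mem hi
      exact lt_of_lt_of_le hj (pre _ hmem)
    by_cases hc : c = j
    · subst hc
      rw [if_pos ⟨rfl, rfl⟩, pv_getD_set_eq _ _ _ _ hjlen]
    · rw [if_neg (fun h => hc h.2), pv_getD_set_ne _ _ _ _ _ (fun h => hc h.symm)]
  · rw [if_neg (fun h => hr h.1), pv_getD_set_ne _ _ _ _ _ (fun h => hr h.symm)]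

theorem pv_key (grid : List (List String)) (s : String) (i j : Nat)
    (pre : ∀ row ∈ grid, grid.length ≤ row.length)
    (hi : i < grid.length) (hj : j < grid.length)
    (hd : pvCell grid i j = "-") :
    (pvIsWinner (pvSetCell grid i j s) s = true) ↔
      (((∃ r < grid.length, (List.range grid.length).countP (fun c => pvCell grid r c == s) = grid.length) ∨
        (∃ c < grid.length, (List.range grid.length).countP (fun r => pvCell grid r c == s) = grid.length) ∨
        (List.range grid.length).countP (fun k => pvCell grid k k == s) = grid.length ∨
        (List.range grid.length).countP (fun k => pvCell grid k (grid.length - k - 1) == s) = grid.length) ∨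
       (((List.range grid.length).countP (fun c => pvCell grid i c == s) : Int) - (if pvCell grid i j == s then 1 else 0) = (grid.length : Int) - 1 ∨
        ((List.range grid.length).countP (fun r => pvCell grid r j == s) : Int) - (if pvCell grid i j == s then 1 else 0) = (grid.length : Int) - 1 ∨
        (i = j ∧ ((List.range grid.length).countP (fun k => pvCell grid k k == s) : Int) - (if pvCell grid i j == s then 1 else 0) = (grid.length : Int) - 1) ∨
        (i + j + 1 = grid.length ∧ ((List.range grid.length).countP (fun k => pvCell grid k (grid.length - k - 1) == s) : Int) - (if pvCell grid i j == s then 1 else 0) = (grid.length : Int) - 1))) := by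
  have hcell : ∀ r c, pvCell (pvSetCell grid i j s) r c =
      if r = i ∧ c = j then s else pvCell grid r c :=
    fun r c => pv_cell_set grid s i j r c pre hi hj
  have hlen' : (pvSetCell grid i j s).length = grid.length := by
    unfold pvSetCell; exact List.length_set ..
  have hwin : pvIsWinner (pvSetCell grid i j s) s =
      (List.range grid.length).any (fun r =>
        ((List.range grid.length).all fun c => pvCell (pvSetCell grid i j s) r c == s) ||
        ((List.range grid.length).all fun c => pvCell (pvSetCell grid i j s) c r == s) ||
        ((List.range grid.length).all fun k => pvCell (pvSetCell grid i j s) k k == s) ||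
        ((List.range grid.length).all fun k => pvCell (pvSetCell grid i j s) k (grid.length - k - 1) == s)) := by
    unfold pvIsWinner
    rw [hlen']
  -- rows
  have hrow_ne : ∀ r, r ≠ i →
      ((List.range grid.length).all fun c => pvCell (pvSetCell grid i j s) r c == s) =
      ((List.range grid.length).all fun c => pvCell grid r c == s) := by
    intro r hr
    apply pv_all_congr
    intro c _
    rw [hcell r c, if_neg (fun h => hr h.1)]
  have hRI : (((List.range grid.length).all fun c => pvCell (pvSetCell grid i j s) i c == s) = true) ↔
      ((List.range grid.length).countP (fun c => pvCell grid i c == s) : Int) -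
        (if pvCell grid i j == s then 1 else 0) = (grid.length : Int) - 1 := by
    have hrow_i : ((List.range grid.length).all fun c => pvCell (pvSetCell grid i j s) i c == s) =
        ((List.range grid.length).all fun c => c == j || (pvCell grid i c == s)) := by
      apply pv_all_congr
      intro c _
      by_cases hcj : c = j
      · subst hcj; rw [hcell, if_pos ⟨rfl, rfl⟩]; simp
      · rw [hcell, if_neg (fun h => hcj h.2)]; simp [hcj]
    rw [hrow_i]
    exact pv_line_iff _ grid.length j hj
  have hrows : (∃ r, r < grid.length ∧ ((List.range grid.length).all fun c => pvCell (pvSetCell grid i j s) r c == s) = true) ↔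
      (((List.range grid.length).countP (fun c => pvCell grid i c == s) : Int) -
          (if pvCell grid i j == s then 1 else 0) = (grid.length : Int) - 1 ∨
        ∃ r < grid.length, (List.range grid.length).countP (fun c => pvCell grid r c == s) = grid.length) := by
    constructor
    · rintro ⟨r, hr, hall⟩
      by_cases hri : r = i
      · subst hri; exact Or.inl (hRI.mp hall)
      · exact Or.inr ⟨r, hr, (pv_all_iff_count _ _).mp (by rw [← hrow_ne r hri]; exact hall)⟩
    · rintro (hc | ⟨r, hr, hcnt⟩)
      · exact ⟨i, hi, hRI.mpr hc⟩
      · by_cases hri : r = i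
        · rw [hri] at hcnt
          refine ⟨i, hi, hRI.mpr ?_⟩
          have hall := (pv_all_iff_count _ _).mpr hcnt
          rw [List.all_eq_true] at hall
          have hs : (pvCell grid i j == s) = true := hall j (by simpa using hj)
          rw [if_pos hs, hcnt]
        · exact ⟨r, hr, by rw [hrow_ne r hri]; exact (pv_all_iff_count _ _).mpr hcnt⟩
  -- columns
  have hcol_ne : ∀ c, c ≠ j →
      ((List.range grid.length).all fun r => pvCell (pvSetCell grid i j s) r c == s) =
      ((List.range grid.length).all fun r => pvCell grid r c == s) := by
    intro c hc
    apply pv_all_congr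
    intro r _
    rw [hcell r c, if_neg (fun h => hc h.2)]
  have hCJ : (((List.range grid.length).all fun r => pvCell (pvSetCell grid i j s) r j == s) = true) ↔
      ((List.range grid.length).countP (fun r => pvCell grid r j == s) : Int) -
        (if pvCell grid i j == s then 1 else 0) = (grid.length : Int) - 1 := by
    have hcol_j : ((List.range grid.length).all fun r => pvCell (pvSetCell grid i j s) r j == s) =
        ((List.range grid.length).all fun r => r == i || (pvCell grid r j == s)) := by
      apply pv_all_congr
      intro r _
      by_cases hri : r = i
      · subst hri; rw [hcell, if_pos ⟨rfl, rfl⟩]; simp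
      · rw [hcell, if_neg (fun h => hri h.1)]; simp [hri]
    rw [hcol_j]
    exact pv_line_iff _ grid.length i hi
  have hcols : (∃ c, c < grid.length ∧ ((List.range grid.length).all fun r => pvCell (pvSetCell grid i j s) r c == s) = true) ↔
      (((List.range grid.length).countP (fun r => pvCell grid r j == s) : Int) -
          (if pvCell grid i j == s then 1 else 0) = (grid.length : Int) - 1 ∨
        ∃ c < grid.length, (List.range grid.length).countP (fun r => pvCell grid r c == s) = grid.length) := by
    constructor
    · rintro ⟨c, hc, hall⟩
      by_cases hcj : c = j
      · subst hcj; exact Or.inl (hCJ.mp hall)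
      · exact Or.inr ⟨c, hc, (pv_all_iff_count _ _).mp (by rw [← hcol_ne c hcj]; exact hall)⟩
    · rintro (hc | ⟨c, hc, hcnt⟩)
      · exact ⟨j, hj, hCJ.mpr hc⟩
      · by_cases hcj : c = j
        · rw [hcj] at hcnt
          refine ⟨j, hj, hCJ.mpr ?_⟩
          have hall := (pv_all_iff_count _ _).mpr hcnt
          rw [List.all_eq_true] at hall
          have hs : (pvCell grid i j == s) = true := hall i (by simpa using hi)
          rw [if_pos hs, hcnt]
        · exact ⟨c, hc, by rw [hcol_ne c hcj]; exact (pv_all_iff_count _ _).mpr hcnt⟩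
  -- main diagonal
  have hdiag : (((List.range grid.length).all fun k => pvCell (pvSetCell grid i j s) k k == s) = true) ↔
      ((i = j ∧ ((List.range grid.length).countP (fun k => pvCell grid k k == s) : Int) -
          (if pvCell grid i j == s then 1 else 0) = (grid.length : Int) - 1) ∨
        (List.range grid.length).countP (fun k => pvCell grid k k == s) = grid.length) := by
    by_cases hij : i = j
    · subst hij
      have hD' : ((List.range grid.length).all fun k => pvCell (pvSetCell grid i i s) k k == s) =
          ((List.range grid.length).all fun k => k == i || (pvCell grid k k == s)) := by
        apply pv_all_congr
        intro k _
        by_cases hki : k = i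
        · subst hki; rw [hcell, if_pos ⟨rfl, rfl⟩]; simp
        · rw [hcell, if_neg (fun h => hki h.1)]; simp [hki]
      rw [hD', pv_line_iff _ grid.length i hi]
      constructor
      · intro h; exact Or.inl ⟨rfl, h⟩
      · rintro (⟨_, h⟩ | h)
        · exact h
        · have hall := (pv_all_iff_count _ _).mpr h
          rw [List.all_eq_true] at hall
          have hs : (pvCell grid i i == s) = true := hall i (by simpa using hi)
          rw [if_pos hs, h]
    · have hD' : ((List.range grid.length).all fun k => pvCell (pvSetCell grid i j s) k k == s) =
          ((List.range grid.length).all fun k => pvCell grid k k == s) := by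
        apply pv_all_congr
        intro k _
        rw [hcell k k, if_neg (fun h => hij (h.1.symm.trans h.2))]
      rw [hD', pv_all_iff_count]
      constructor
      · exact fun h => Or.inr h
      · rintro (⟨hij', _⟩ | h)
        · exact absurd hij' hij
        · exact h
  -- anti-diagonal
  have hadiag : (((List.range grid.length).all fun k => pvCell (pvSetCell grid i j s) k (grid.length - k - 1) == s) = true) ↔
      ((i + j + 1 = grid.length ∧ ((List.range grid.length).countP (fun k => pvCell grid k (grid.length - k - 1) == s) : Int) -
          (if pvCell grid i j == s then 1 else 0) = (grid.length : Int) - 1) ∨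
        (List.range grid.length).countP (fun k => pvCell grid k (grid.length - k - 1) == s) = grid.length) := by
    by_cases hij : i + j + 1 = grid.length
    · have hjn : grid.length - i - 1 = j := by omega
      have hA' : ((List.range grid.length).all fun k => pvCell (pvSetCell grid i j s) k (grid.length - k - 1) == s) =
          ((List.range grid.length).all fun k => k == i || (pvCell grid k (grid.length - k - 1) == s)) := by
        apply pv_all_congr
        intro k _
        by_cases hki : k = i
        · subst hki
          rw [show grid.length - k - 1 = j from hjn, hcell, if_pos ⟨rfl, rfl⟩]
          simp
        · rw [hcell, if_neg (fun h => hki h.1)]; simp [hki]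
      rw [hA', pv_line_iff _ grid.length i hi, show grid.length - i - 1 = j from hjn]
      constructor
      · exact fun h => Or.inl ⟨hij, h⟩
      · rintro (⟨_, h⟩ | h)
        · exact h
        · have hall := (pv_all_iff_count _ _).mpr h
          rw [List.all_eq_true] at hall
          have hs := hall i (by simpa using hi)
          rw [show grid.length - i - 1 = j from hjn] at hs
          rw [if_pos hs, h]
    · have hA' : ((List.range grid.length).all fun k => pvCell (pvSetCell grid i j s) k (grid.length - k - 1) == s) =
          ((List.range grid.length).all fun k => pvCell grid k (grid.length - k - 1) == s) := by
        apply pv_all_congr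
        intro k hk
        simp only [List.mem_range] at hk
        rw [hcell, if_neg (fun h => hij (by obtain ⟨h1, h2⟩ := h; omega))]
      rw [hA', pv_all_iff_count]
      constructor
      · exact fun h => Or.inr h
      · rintro (⟨hij', _⟩ | h)
        · exact absurd hij' hij
        · exact h
  -- assembly
  rw [hwin, List.any_eq_true]
  simp only [List.mem_range, Bool.or_eq_true]
  constructor
  · rintro ⟨r, hr, ((h1 | h2) | h3) | h4⟩
    · rcases hrows.mp ⟨r, hr, h1⟩ with hc | he
      · exact Or.inr (Or.inl hc)
      · exact Or.inl (Or.inl he)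
    · rcases hcols.mp ⟨r, hr, h2⟩ with hc | he
      · exact Or.inr (Or.inr (Or.inl hc))
      · exact Or.inl (Or.inr (Or.inl he))
    · rcases hdiag.mp h3 with hc | he
      · exact Or.inr (Or.inr (Or.inr (Or.inl hc)))
      · exact Or.inl (Or.inr (Or.inr (Or.inl he)))
    · rcases hadiag.mp h4 with hc | he
      · exact Or.inr (Or.inr (Or.inr (Or.inr hc)))
      · exact Or.inl (Or.inr (Or.inr (Or.inr he)))
  · rintro (he | hc)
    · rcases he with h | h | h | h
      · obtain ⟨r, hr, hall⟩ := hrows.mpr (Or.inr h)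
        exact ⟨r, hr, Or.inl (Or.inl (Or.inl hall))⟩
      · obtain ⟨c, hc2, hall⟩ := hcols.mpr (Or.inr h)
        exact ⟨c, hc2, Or.inl (Or.inl (Or.inr hall))⟩
      · exact ⟨i, hi, Or.inl (Or.inr (hdiag.mpr (Or.inr h)))⟩
      · exact ⟨i, hi, Or.inr (hadiag.mpr (Or.inr h))⟩
    · rcases hc with h | h | h | h
      · obtain ⟨r, hr, hall⟩ := hrows.mpr (Or.inl h)
        exact ⟨r, hr, Or.inl (Or.inl (Or.inl hall))⟩
      · obtain ⟨c, hc2, hall⟩ := hcols.mpr (Or.inl h)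
        exact ⟨c, hc2, Or.inl (Or.inl (Or.inr hall))⟩
      · exact ⟨i, hi, Or.inl (Or.inr (hdiag.mpr (Or.inl h)))⟩
      · exact ⟨i, hi, Or.inr (hadiag.mpr (Or.inl h))⟩

-- translate a full line (countP = size) into Pre_'s pointwise form
theorem pv_count_full (grid : List (List String)) (s : String) (f : Nat → Nat × Nat)
    (h : (List.range grid.length).countP (fun k => pvCell grid (f k).1 (f k).2 == s) = grid.length) :
    ∀ k < grid.length, pvCell grid (f k).1 (f k).2 = s := by
  intro k hk
  have hall := (pv_all_iff_count _ _).mpr h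
  rw [List.all_eq_true] at hall
  simpa using hall k (by simpa using hk)

set_option maxHeartbeats 1000000 in
theorem choose_winning_move_spec : Claim_equal_choose_winning_move := by
  intro grid symbol _ pre
  obtain ⟨pre1, preE⟩ := pre
  unfold Spec_choose_winning_move choose_winning_move choose_winning_move_alt
  apply pv_findSome?_congr
  intro i hmi
  apply pv_findSome?_congr
  intro j hmj
  simp only [List.mem_range] at hmi hmj
  by_cases hdash : (pvCell grid i j == "-") = true
  · rw [if_pos hdash, if_pos hdash]
    have hd : pvCell grid i j = "-" := by simpa using hdash
    have h0 : 0 < grid.length := Nat.lt_of_le_of_lt (Nat.zero_le i) hmi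
    obtain ⟨pre2, pre3⟩ := preE ⟨i, hmi, j, hmj, hd⟩
    have hadj : (pvCell grid i j == symbol) = false := by
      rw [hd]
      simpa using fun h => pre2 h.symm
    have key := pv_key grid symbol i j pre1 hmi hmj hd
    rw [hadj] at key
    simp only [if_false, Bool.false_eq_true] at key
    -- the already-won disjuncts are excluded by Pre_
    have hnr : ¬ (∃ r < grid.length, (List.range grid.length).countP (fun c => pvCell grid r c == symbol) = grid.length) := by
      rintro ⟨r, hr, hc⟩
      exact pre3 (Or.inl ⟨r, hr, fun c hcc =>
        pv_count_full grid symbol (fun k => (r, k)) hc c hcc⟩)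
    have hnc : ¬ (∃ c < grid.length, (List.range grid.length).countP (fun r => pvCell grid r c == symbol) = grid.length) := by
      rintro ⟨c, hc, hcnt⟩
      exact pre3 (Or.inr (Or.inl ⟨c, hc, fun r hrr =>
        pv_count_full grid symbol (fun k => (k, c)) hcnt r hrr⟩))
    have hnd : ¬ ((List.range grid.length).countP (fun k => pvCell grid k k == symbol) = grid.length) := by
      intro hcnt
      exact pre3 (Or.inr (Or.inr (Or.inl ⟨h0, fun k hk =>
        pv_count_full grid symbol (fun k => (k, k)) hcnt k hk⟩)))
    have hna : ¬ ((List.range grid.length).countP (fun k => pvCell grid k (grid.length - k - 1) == symbol) = grid.length) := by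
      intro hcnt
      exact pre3 (Or.inr (Or.inr (Or.inr ⟨h0, fun k hk =>
        pv_count_full grid symbol (fun k => (k, grid.length - k - 1)) hcnt k hk⟩)))
    -- both if-conditions are equal booleans
    have hcR : (List.range grid.length).countP (fun c => pvCell grid i c == symbol) ≤ grid.length := by
      simpa using List.countP_le_length (p := fun c => pvCell grid i c == symbol) (l := List.range grid.length)
    have hcC : (List.range grid.length).countP (fun r => pvCell grid r j == symbol) ≤ grid.length := by
      simpa using List.countP_le_length (p := fun r => pvCell grid r j == symbol) (l := List.range grid.length)
    have hcD : (List.range grid.length).countP (fun k => pvCell grid k k == symbol) ≤ grid.length := by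
      simpa using List.countP_le_length (p := fun k => pvCell grid k k == symbol) (l := List.range grid.length)
    have hcA : (List.range grid.length).countP (fun k => pvCell grid k (grid.length - k - 1) == symbol) ≤ grid.length := by
      simpa using List.countP_le_length (p := fun k => pvCell grid k (grid.length - k - 1) == symbol) (l := List.range grid.length)
    have hsub : ∀ k : Nat, grid.length - 1 - k = grid.length - k - 1 := fun k => by omega
    have hcond : (pvIsWinner (pvSetCell grid i j symbol) symbol) =
        (((List.range grid.length).map (fun i => (List.range grid.length).countP (fun j => pvCell grid i j == symbol))).getD i 0 == grid.length - 1 ||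
         ((List.range grid.length).map (fun j => (List.range grid.length).countP (fun i => pvCell grid i j == symbol))).getD j 0 == grid.length - 1 ||
         (i == j && ((List.range grid.length).countP (fun i => pvCell grid i i == symbol) == grid.length - 1)) ||
         (i + j == grid.length - 1 && ((List.range grid.length).countP (fun i => pvCell grid i (grid.length - 1 - i) == symbol) == grid.length - 1))) := by
      apply Bool.coe_iff_coe.mp
      rw [key]
      simp only [hsub, Bool.or_eq_true, Bool.and_eq_true, beq_iff_eq,
        pv_getD_map_range _ _ _ hmi, pv_getD_map_range _ _ _ hmj]
      constructor
      · rintro (hwon | h | h | ⟨hij, h⟩ | ⟨hij, h⟩)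
        · rcases hwon with h | h | h | h
          exacts [absurd h hnr, absurd h hnc, absurd h hnd, absurd h hna]
        · exact Or.inl (Or.inl (Or.inl (by omega)))
        · exact Or.inl (Or.inl (Or.inr (by omega)))
        · exact Or.inl (Or.inr ⟨hij, by omega⟩)
        · exact Or.inr ⟨by omega, by omega⟩
      · rintro (((h | h) | ⟨hij, h⟩) | ⟨hij, h⟩)
        · exact Or.inr (Or.inl (by omega))
        · exact Or.inr (Or.inr (Or.inl (by omega)))
        · exact Or.inr (Or.inr (Or.inr (Or.inl ⟨hij, by omega⟩)))
        · exact Or.inr (Or.inr (Or.inr (Or.inr ⟨by omega, by omega⟩)))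
    rw [hcond]
  · rw [if_neg hdash, if_neg hdash]
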